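-- pv_equiv track=rewrite | github.com/mberjans/ai_coding_automated_setup_augmentode | src/combination/ids.py | _parse_ticket_id_from_line
-- ===== SOURCE A (Python) =====
-- from typing import Any, Dict, List, Tuple
--
-- def _find_substring(text: str, sub: str, start: int = 0) -> int:
--     i = start
--     n = len(text)
--     m = len(sub)
--     while i <= n - m:
--         j = 0
--         match = True
--         while j < m:
--             if text[i + j] != sub[j]:
--                 match = False
--                 break
--             j = j + 1
--         if match:
--             return i
--         i = i + 1
--     return -1
--
-- def _is_digit(ch: str) -> bool:
--     return ch >= "0" and ch <= "9"
--
-- def _parse_ticket_id_from_line(line: str) -> Tuple[bool, str]: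
--     # Find 'TICKET-'
--     idx = _find_substring(line, "TICKET-")
--     if idx == -1:
--         return False, ""
--     i = idx + len("TICKET-")
--     # Consume digits
--     start = i
--     while i < len(line) and _is_digit(line[i]):
--         i = i + 1
--     if i == start:
--         return False, ""
--     return True, "TICKET-" + line[start:i]
-- ===== SOURCE B (Python) =====
-- from typing import Tuple
--
-- def _parse_ticket_id_from_line(line: str) -> Tuple[bool, str]:
--     # Single left-to-right KMP automaton pass: k is the length of the longest
--     # suffix of the scanned text that is a prefix of 'TICKET-' (failure links
--     # precomputed), so no backtracking scan is ever needed; once the automaton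
--     # reaches the accepting state, collect the digit run that follows.
--     PAT = "TICKET-"
--     FAIL = (0, 0, 0, 0, 0, 1, 0)
--     n = len(line)
--     i = 0
--     k = 0
--     while i < n and k < 7:
--         c = line[i]
--         while k > 0 and c != PAT[k]:
--             k = FAIL[k - 1]
--         if c == PAT[k]:
--             k = k + 1
--         i = i + 1
--     if k < 7:
--         return False, ""
--     digits = ""
--     while i < n and "0" <= line[i] <= "9":
--         digits = digits + line[i]
--         i = i + 1
--     if not digits:
--         return False, ""
--     return True, PAT + digits
-- ===== Notes on version B (the rewrite author's own statement) =====
-- stated objective: alternative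
-- what changed: A's naive nested-loop substring search (restarting the comparison at every start index) plus a separate digit-index loop is replaced by a single left-to-right KMP automaton pass with a precomputed failure table for 'TICKET-', which never re-examines a consumed character, followed by digit collection from the accepting position.
import Mathlib
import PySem

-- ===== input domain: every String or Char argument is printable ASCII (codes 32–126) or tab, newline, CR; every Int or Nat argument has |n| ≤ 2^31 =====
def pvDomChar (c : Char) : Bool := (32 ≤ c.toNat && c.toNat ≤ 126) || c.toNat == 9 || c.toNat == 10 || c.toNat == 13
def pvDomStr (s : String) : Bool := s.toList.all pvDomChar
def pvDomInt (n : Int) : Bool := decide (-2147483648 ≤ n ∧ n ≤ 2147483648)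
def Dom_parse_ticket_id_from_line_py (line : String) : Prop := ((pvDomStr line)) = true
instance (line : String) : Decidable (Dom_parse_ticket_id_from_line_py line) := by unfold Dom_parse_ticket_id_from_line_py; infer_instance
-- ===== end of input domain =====

-- B replaces A's naive restart-at-every-index substring search and separate digit
-- index loop by a single KMP-automaton pass (precomputed failure table) followed by
-- digit collection; same return value on every input.

-- ===== PORT A =====
-- inner 'while j < m' loop of _find_substring (computes the final 'match' flag)
def pvMatchAt (text sub : List Char) (i j : Nat) : Bool :=
  if _h : j < sub.length then
    if PySem.List.pyGetD text ((i + j : Nat) : Int) ' ' ≠ PySem.List.pyGetD sub ((j : Nat) : Int) ' ' then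
      false
    else
      pvMatchAt text sub i (j + 1)
  else
    true
termination_by sub.length - j

-- outer 'while i <= n - m' loop of _find_substring
def pvFindSub (text sub : List Char) (i : Nat) : Int :=
  if _h : i + sub.length ≤ text.length then
    if pvMatchAt text sub i 0 then (i : Int)
    else pvFindSub text sub (i + 1)
  else
    -1
termination_by text.length + 1 - i

-- _is_digit / the comparison '"0" <= ch <= "9"': exact as a Char comparison
def pvIsDigit (ch : Char) : Bool := '0' ≤ ch && ch ≤ '9'

-- the digit-consuming 'while i < len(line)' loop of A
def pvConsume (line : List Char) (i : Nat) : Nat :=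
  if _h : i < line.length then
    if pvIsDigit (PySem.List.pyGetD line ((i : Nat) : Int) ' ') then pvConsume line (i + 1)
    else i
  else
    i
termination_by line.length - i

def parse_ticket_id_from_line_py (line : String) : Bool × String :=
  let s := line.toList
  let idx := pvFindSub s "TICKET-".toList 0
  if idx = -1 then (false, "")
  else
    let i0 := idx.toNat + ("TICKET-".toList).length
    let i := pvConsume s i0
    if i = i0 then (false, "")
    else (true, String.ofList ("TICKET-".toList ++ PySem.List.slice s (some (i0 : Int)) (some (i : Int))))

-- ===== PORT B =====
def pvPAT : List Char := "TICKET-".toList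
def pvFAIL : List Nat := [0, 0, 0, 0, 0, 1, 0]

-- the failure table always jumps strictly down (termination of the inner while loop)
theorem pvFAIL_lt (k : Nat) (h : 0 < k) : pvFAIL.getD (k - 1) 0 < k := by
  rcases lt_or_ge k 8 with h8 | h8
  · interval_cases k <;> decide
  · have he : pvFAIL.getD (k - 1) 0 = 0 := by
      apply List.getD_eq_default
      simp only [pvFAIL, List.length_cons, List.length_nil]
      omega
    omega

-- the inner 'while k > 0 and c != PAT[k]' loop of B
def pvWhile (k : Nat) (c : Char) : Nat :=
  if h : 0 < k ∧ c ≠ pvPAT.getD k ' ' then pvWhile (pvFAIL.getD (k - 1) 0) c else k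
termination_by k
decreasing_by exact pvFAIL_lt k h.1

-- the 'while i < n and k < 7' automaton loop of B: returns (k, unread rest)
def pvKmp : List Char → Nat → Nat × List Char
  | [], k => (k, [])
  | c :: t, k =>
      if k < 7 then
        pvKmp t (if c = pvPAT.getD (pvWhile k c) ' ' then pvWhile k c + 1 else pvWhile k c)
      else (k, c :: t)

-- the 'while i < n and "0" <= line[i] <= "9"' digit loop of B
def pvDigits : List Char → List Char → List Char
  | [], acc => acc
  | c :: t, acc => if pvIsDigit c then pvDigits t (acc ++ [c]) else acc

def parse_ticket_id_from_line_py_alt (line : String) : Bool × String :=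
  let r := pvKmp line.toList 0
  if r.1 < 7 then (false, "")
  else
    let digits := pvDigits r.2 []
    if digits = [] then (false, "")
    else (true, String.ofList (pvPAT ++ digits))

-- ===== PRECONDITION & SPEC =====
def Spec_parse_ticket_id_from_line_py (line : String) (out : Bool × String) : Prop := out = parse_ticket_id_from_line_py_alt line
instance (line : String) (out : Bool × String) : Decidable (Spec_parse_ticket_id_from_line_py line out) := by unfold Spec_parse_ticket_id_from_line_py; infer_instance

-- ===== CLAIM (what is proved, stated in full; the proofs are below) =====
def Claim_equal_parse_ticket_id_from_line_py : Prop := ∀ (line : String), Dom_parse_ticket_id_from_line_py line → Spec_parse_ticket_id_from_line_py line (parse_ticket_id_from_line_py line)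

-- ===== LEMMAS AND PROOFS =====

-- common reference function both ports are proved equal to:
-- result of the digit run following an occurrence
def pvDigitRes (l : List Char) : Bool × String :=
  if l.takeWhile pvIsDigit = [] then (false, "")
  else (true, String.ofList (pvPAT ++ l.takeWhile pvIsDigit))

-- peel positions left to right; act at the first occurrence of the pattern
def pvSpecFn : List Char → Bool × String
  | [] => (false, "")
  | c :: t => if pvPAT <+: (c :: t) then pvDigitRes (t.drop 6) else pvSpecFn t

theorem pvSpecFn_short (l : List Char) (h : l.length < 7) : pvSpecFn l = (false, "") := by
  induction l with
  | nil => rfl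
  | cons c t ih =>
    have hnp : ¬ pvPAT <+: (c :: t) := by
      intro hp
      have h2 := hp.length_le
      have h7 : pvPAT.length = 7 := rfl
      rw [h7, List.length_cons] at h2
      simp only [List.length_cons] at h
      omega
    simp only [pvSpecFn, if_neg hnp]
    exact ih (by simp only [List.length_cons] at h; omega)

theorem pvSpecFn_of_first (l : List Char) (i₀ : Nat)
    (hpre : pvPAT <+: l.drop i₀) (hmin : ∀ j, j < i₀ → ¬ pvPAT <+: l.drop j) :
    pvSpecFn l = pvDigitRes (l.drop (i₀ + 7)) := by
  induction l generalizing i₀ with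
  | nil =>
    exfalso
    have := hpre.length_le
    simp [pvPAT] at this
  | cons c t ih =>
    cases i₀ with
    | zero =>
      simp only [List.drop_zero] at hpre
      simp only [pvSpecFn, if_pos hpre]
      rfl
    | succ j =>
      have hnp : ¬ pvPAT <+: (c :: t) := by
        have := hmin 0 (Nat.succ_pos j)
        simpa using this
      simp only [pvSpecFn, if_neg hnp]
      have h1 : pvSpecFn t = pvDigitRes (t.drop (j + 7)) := by
        apply ih j
        · simpa using hpre
        · intro j' hj'
          have := hmin (j' + 1) (by omega)
          simpa using this
      rw [h1, show j + 1 + 7 = (j + 7) + 1 from by omega, List.drop_succ_cons]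

theorem pvSpecFn_of_none (l : List Char) (h : ∀ i, ¬ pvPAT <+: l.drop i) :
    pvSpecFn l = (false, "") := by
  induction l with
  | nil => rfl
  | cons c t ih =>
    have h0 := h 0
    simp only [List.drop_zero] at h0
    simp only [pvSpecFn, if_neg h0]
    exact ih fun i => by simpa using h (i + 1)

-- ===== A = pvSpecFn =====

-- the inner character-comparison loop decides 'sub.drop j is a prefix of text at i+j'
theorem pvMatchAt_gen (text sub : List Char) (i j : Nat)
    (h : i + sub.length ≤ text.length) (hj : j ≤ sub.length) :
    (pvMatchAt text sub i j = true ↔ sub.drop j <+: text.drop (i + j)) := by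
  fun_induction pvMatchAt text sub i j with
  | case1 j hlt hne =>
    have hjt : i + j < text.length := by omega
    rw [List.drop_eq_getElem_cons (l := sub) (by omega), List.drop_eq_getElem_cons (l := text) hjt]
    simp only [PySem.List.pyGetD_natCast, List.getD_eq_getElem?_getD,
      List.getElem?_eq_getElem hjt, List.getElem?_eq_getElem hlt, Option.getD_some] at hne
    simp only [Bool.false_eq_true, false_iff, List.cons_prefix_cons, not_and]
    exact fun he _ => hne he.symm
  | case2 j hlt heq ih =>
    have hjt : i + j < text.length := by omega
    rw [List.drop_eq_getElem_cons (l := sub) (by omega), List.drop_eq_getElem_cons (l := text) hjt]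
    simp only [PySem.List.pyGetD_natCast, List.getD_eq_getElem?_getD,
      List.getElem?_eq_getElem hjt, List.getElem?_eq_getElem hlt, Option.getD_some, not_not] at heq
    rw [List.cons_prefix_cons]
    have := ih (by omega)
    rw [show i + (j + 1) = i + j + 1 from by omega] at this
    rw [this]
    simp [heq]
  | case3 j hge =>
    simp only [List.drop_eq_nil_iff.mpr (by omega : sub.length ≤ j)] at *
    simp

theorem pvMatchAt_iff (text sub : List Char) (i : Nat)
    (h : i + sub.length ≤ text.length) :
    (pvMatchAt text sub i 0 = true ↔ sub <+: text.drop i) := by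
  simpa using pvMatchAt_gen text sub i 0 h (by omega)

-- the outer loop returns -1 exactly when there is no occurrence at index ≥ i …
theorem pvFindSub_eq_neg_one (text sub : List Char) (i : Nat)
    (h : ∀ k, i ≤ k → ¬ sub <+: text.drop k) :
    pvFindSub text sub i = -1 := by
  fun_induction pvFindSub text sub i with
  | case1 i hle hm =>
    exact absurd ((pvMatchAt_iff text sub i hle).mp hm) (h i le_rfl)
  | case2 i hle hm ih =>
    exact ih fun k hk => h k (by omega)
  | case3 i hge => rfl

-- … and otherwise the first occurrence at index ≥ i
theorem pvFindSub_eq_first (text sub : List Char) (i k : Nat)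
    (hm : 0 < sub.length)
    (hik : i ≤ k) (hk : sub <+: text.drop k)
    (hmin : ∀ k', i ≤ k' → k' < k → ¬ sub <+: text.drop k') :
    pvFindSub text sub i = (k : Int) := by
  have hkbound : k + sub.length ≤ text.length := by
    have h1 := hk.length_le
    rw [List.length_drop] at h1
    omega
  fun_induction pvFindSub text sub i with
  | case1 i hle hmt =>
    have hpi := (pvMatchAt_iff text sub i hle).mp hmt
    have : ¬ i < k := fun hlt => hmin i le_rfl hlt hpi
    have : i = k := by omega
    simp [this]
  | case2 i hle hmt ih =>
    have hik1 : i + 1 ≤ k := by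
      rcases Nat.eq_or_lt_of_le hik with rfl | h
      · exact absurd ((pvMatchAt_iff text sub i hle).mpr hk) (by simpa using hmt)
      · omega
    exact ih hik1 fun k' h1 h2 => hmin k' (by omega) h2
  | case3 i hge =>
    exact absurd hkbound (by omega)

-- the consume loop lands at i0 + length of the digit prefix of s.drop i0
theorem pvConsume_eq (s : List Char) (i0 : Nat) :
    pvConsume s i0 = i0 + ((s.drop i0).takeWhile pvIsDigit).length := by
  fun_induction pvConsume s i0 with
  | case1 i hlt hdig ih =>
    rw [List.drop_eq_getElem_cons hlt]
    simp only [PySem.List.pyGetD_natCast, List.getD_eq_getElem?_getD,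
      List.getElem?_eq_getElem hlt, Option.getD_some] at hdig
    rw [List.takeWhile_cons_of_pos hdig]
    simp [ih]
    omega
  | case2 i hlt hdig =>
    rw [List.drop_eq_getElem_cons hlt]
    simp only [PySem.List.pyGetD_natCast, List.getD_eq_getElem?_getD,
      List.getElem?_eq_getElem hlt, Option.getD_some] at hdig
    rw [List.takeWhile_cons_of_neg (by simpa using hdig)]
    simp
  | case3 i hge =>
    rw [List.drop_eq_nil_iff.mpr (by omega)]
    simp

theorem A_eq_spec (line : String) :
    parse_ticket_id_from_line_py line = pvSpecFn line.toList := by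
  unfold parse_ticket_id_from_line_py
  dsimp only []
  by_cases h : ∃ i : Nat, pvPAT <+: line.toList.drop i
  · have hpre : pvPAT <+: line.toList.drop (Nat.find h) := Nat.find_spec h
    have hmin : ∀ j, j < Nat.find h → ¬ pvPAT <+: line.toList.drop j := fun j hj => Nat.find_min h hj
    have hfind : pvFindSub line.toList "TICKET-".toList 0 = ((Nat.find h : Nat) : Int) :=
      pvFindSub_eq_first _ _ 0 (Nat.find h) (by decide) (Nat.zero_le _) hpre
        (fun k' _ hk => hmin k' hk)
    rw [hfind]
    rw [if_neg (by omega)]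
    rw [pvSpecFn_of_first line.toList (Nat.find h) hpre hmin]
    have hlen : ("TICKET-".toList).length = 7 := rfl
    rw [Int.toNat_natCast, hlen]
    rw [pvConsume_eq line.toList (Nat.find h + 7)]
    set tw := ((line.toList.drop (Nat.find h + 7)).takeWhile pvIsDigit) with htw
    by_cases he : tw = []
    · rw [if_pos (by rw [he]; simp)]
      simp [pvDigitRes, ← htw, he]
    · rw [if_neg (fun hc => he (List.length_eq_zero_iff.mp (by omega)))]
      rw [pvDigitRes, if_neg he]
      have hsl : PySem.List.slice line.toList (some ((Nat.find h + 7 : Nat) : Int))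
          (some ((Nat.find h + 7 + tw.length : Nat) : Int)) = tw := by
        rw [PySem.List.slice_natCast]
        rw [show Nat.find h + 7 + tw.length - (Nat.find h + 7) = tw.length from by omega]
        rw [htw]
        exact (List.prefix_iff_eq_take.mp (List.takeWhile_prefix pvIsDigit)).symm
      rw [hsl, htw]
      rfl
  · simp only [not_exists] at h
    rw [pvFindSub_eq_neg_one line.toList "TICKET-".toList 0 (fun k _ => h k)]
    rw [if_pos rfl, pvSpecFn_of_none _ h]

-- ===== B = pvSpecFn =====

theorem pvDigits_eq (l : List Char) : ∀ acc, pvDigits l acc = acc ++ l.takeWhile pvIsDigit := by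
  induction l with
  | nil => intro acc; simp [pvDigits]
  | cons c t ih =>
    intro acc
    by_cases hd : pvIsDigit c = true
    · simp [pvDigits, hd, ih, List.takeWhile_cons_of_pos hd]
    · simp [pvDigits, hd, List.takeWhile_cons_of_neg (by simpa using hd)]

theorem pvKmp_done (cs : List Char) : pvKmp cs 7 = (7, cs) := by
  cases cs <;> simp [pvKmp]

-- post-processing of B's result
def pvFinish (p : Nat × List Char) : Bool × String :=
  if p.1 < 7 then (false, "")
  else if pvDigits p.2 [] = [] then (false, "")
  else (true, String.ofList (pvPAT ++ pvDigits p.2 []))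

theorem pvFinish_seven (cs : List Char) : pvFinish (7, cs) = pvDigitRes cs := by
  simp only [pvFinish, pvDigitRes, pvDigits_eq, List.nil_append]
  rfl

theorem pvPAT_eq : pvPAT = ['T','I','C','K','E','T','-'] := rfl

theorem pvWhile_stop (k : Nat) (c : Char) (h : ¬(0 < k ∧ c ≠ pvPAT.getD k ' ')) : pvWhile k c = k := by
  rw [pvWhile, dif_neg h]

theorem pvWhile_fall (k : Nat) (c : Char) (h : 0 < k ∧ c ≠ pvPAT.getD k ' ') :
    pvWhile k c = pvWhile (pvFAIL.getD (k - 1) 0) c := by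
  rw [pvWhile, dif_pos h]

-- closed form of one automaton transition (inner while loop + the advance test)
def pvStepVal (k : Nat) (c : Char) : Nat :=
  if c = pvPAT.getD k ' ' then k + 1
  else if k = 6 ∧ c = 'I' then 2
  else if c = 'T' then 1 else 0

theorem step_val (k : Nat) (hk : k ≤ 6) (c : Char) :
    (if c = pvPAT.getD (pvWhile k c) ' ' then pvWhile k c + 1 else pvWhile k c) = pvStepVal k c := by
  interval_cases k
  · rw [pvWhile_stop 0 c (by simp)]
    by_cases hT : c = 'T' <;> simp [pvStepVal, pvPAT_eq, List.getD, hT]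
  · by_cases hI : c = 'I'
    · rw [pvWhile_stop 1 c (by simp [hI, pvPAT_eq, List.getD])]
      simp [pvStepVal, hI, pvPAT_eq, List.getD]
    · rw [pvWhile_fall 1 c ⟨by norm_num, by simpa [pvPAT_eq, List.getD] using hI⟩,
          show pvFAIL.getD (1 - 1) 0 = 0 from rfl, pvWhile_stop 0 c (by simp)]
      by_cases hT : c = 'T' <;> simp [pvStepVal, hI, hT, pvPAT_eq, List.getD]
  · by_cases hC : c = 'C'
    · rw [pvWhile_stop 2 c (by simp [hC, pvPAT_eq, List.getD])]
      simp [pvStepVal, hC, pvPAT_eq, List.getD]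
    · rw [pvWhile_fall 2 c ⟨by norm_num, by simpa [pvPAT_eq, List.getD] using hC⟩,
          show pvFAIL.getD (2 - 1) 0 = 0 from rfl, pvWhile_stop 0 c (by simp)]
      by_cases hT : c = 'T' <;> simp [pvStepVal, hC, hT, pvPAT_eq, List.getD]
  · by_cases hK : c = 'K'
    · rw [pvWhile_stop 3 c (by simp [hK, pvPAT_eq, List.getD])]
      simp [pvStepVal, hK, pvPAT_eq, List.getD]
    · rw [pvWhile_fall 3 c ⟨by norm_num, by simpa [pvPAT_eq, List.getD] using hK⟩,
          show pvFAIL.getD (3 - 1) 0 = 0 from rfl, pvWhile_stop 0 c (by simp)]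
      by_cases hT : c = 'T' <;> simp [pvStepVal, hK, hT, pvPAT_eq, List.getD]
  · by_cases hE : c = 'E'
    · rw [pvWhile_stop 4 c (by simp [hE, pvPAT_eq, List.getD])]
      simp [pvStepVal, hE, pvPAT_eq, List.getD]
    · rw [pvWhile_fall 4 c ⟨by norm_num, by simpa [pvPAT_eq, List.getD] using hE⟩,
          show pvFAIL.getD (4 - 1) 0 = 0 from rfl, pvWhile_stop 0 c (by simp)]
      by_cases hT : c = 'T' <;> simp [pvStepVal, hE, hT, pvPAT_eq, List.getD]
  · by_cases hT : c = 'T'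
    · rw [pvWhile_stop 5 c (by simp [hT, pvPAT_eq, List.getD])]
      simp [pvStepVal, hT, pvPAT_eq, List.getD]
    · rw [pvWhile_fall 5 c ⟨by norm_num, by simpa [pvPAT_eq, List.getD] using hT⟩,
          show pvFAIL.getD (5 - 1) 0 = 0 from rfl, pvWhile_stop 0 c (by simp)]
      simp [pvStepVal, hT, pvPAT_eq, List.getD]
  · by_cases hD : c = '-'
    · rw [pvWhile_stop 6 c (by simp [hD, pvPAT_eq, List.getD])]
      simp [pvStepVal, hD, pvPAT_eq, List.getD]
    · rw [pvWhile_fall 6 c ⟨by norm_num, by simpa [pvPAT_eq, List.getD] using hD⟩,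
          show pvFAIL.getD (6 - 1) 0 = 1 from rfl]
      by_cases hI : c = 'I'
      · rw [pvWhile_stop 1 c (by simp [hI, pvPAT_eq, List.getD])]
        simp [pvStepVal, hI, pvPAT_eq, List.getD]
      · rw [pvWhile_fall 1 c ⟨by norm_num, by simpa [pvPAT_eq, List.getD] using hI⟩,
            show pvFAIL.getD (1 - 1) 0 = 0 from rfl, pvWhile_stop 0 c (by simp)]
        by_cases hT : c = 'T' <;> simp [pvStepVal, hD, hI, hT, pvPAT_eq, List.getD]

-- the KMP step: one character advances the automaton exactly as the reference
-- function advances by consuming one position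
theorem pvStep_spec (k : Nat) (hk : k ≤ 6) (c : Char) (cs : List Char) :
    ((if c = pvPAT.getD (pvWhile k c) ' ' then pvWhile k c + 1 else pvWhile k c) ≤ 6 ∧
      pvSpecFn (pvPAT.take k ++ c :: cs) =
        pvSpecFn (pvPAT.take (if c = pvPAT.getD (pvWhile k c) ' ' then pvWhile k c + 1 else pvWhile k c) ++ cs)) ∨
    ((if c = pvPAT.getD (pvWhile k c) ' ' then pvWhile k c + 1 else pvWhile k c) = 7 ∧
      pvSpecFn (pvPAT.take k ++ c :: cs) = pvDigitRes cs) := by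
  rw [step_val k hk c]
  interval_cases k
  · by_cases hT : c = 'T'
    · subst hT
      rw [show pvStepVal 0 'T' = 1 from by decide]
      exact Or.inl ⟨by norm_num, by simp [pvPAT_eq]⟩
    · rw [show pvStepVal 0 c = 0 from by simp [pvStepVal, pvPAT_eq, List.getD, hT]]
      exact Or.inl ⟨by norm_num, by simp [pvSpecFn, pvPAT_eq, List.cons_prefix_cons, Ne.symm hT]⟩
  · by_cases hI : c = 'I'
    · subst hI
      rw [show pvStepVal 1 'I' = 2 from by decide]
      exact Or.inl ⟨by norm_num, by simp [pvPAT_eq]⟩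
    · by_cases hT : c = 'T'
      · subst hT
        rw [show pvStepVal 1 'T' = 1 from by decide]
        exact Or.inl ⟨by norm_num, by simp [pvSpecFn, pvPAT_eq, List.cons_prefix_cons]⟩
      · rw [show pvStepVal 1 c = 0 from by simp [pvStepVal, pvPAT_eq, List.getD, hI, hT]]
        exact Or.inl ⟨by norm_num,
          by simp [pvSpecFn, pvPAT_eq, List.cons_prefix_cons, Ne.symm hI, Ne.symm hT]⟩
  · by_cases hC : c = 'C'
    · subst hC
      rw [show pvStepVal 2 'C' = 3 from by decide]
      exact Or.inl ⟨by norm_num, by simp [pvPAT_eq]⟩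
    · by_cases hT : c = 'T'
      · subst hT
        rw [show pvStepVal 2 'T' = 1 from by decide]
        exact Or.inl ⟨by norm_num, by simp [pvSpecFn, pvPAT_eq, List.cons_prefix_cons]⟩
      · rw [show pvStepVal 2 c = 0 from by simp [pvStepVal, pvPAT_eq, List.getD, hC, hT]]
        exact Or.inl ⟨by norm_num,
          by simp [pvSpecFn, pvPAT_eq, List.cons_prefix_cons, Ne.symm hC, Ne.symm hT]⟩
  · by_cases hK : c = 'K'
    · subst hK
      rw [show pvStepVal 3 'K' = 4 from by decide]
      exact Or.inl ⟨by norm_num, by simp [pvPAT_eq]⟩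
    · by_cases hT : c = 'T'
      · subst hT
        rw [show pvStepVal 3 'T' = 1 from by decide]
        exact Or.inl ⟨by norm_num, by simp [pvSpecFn, pvPAT_eq, List.cons_prefix_cons]⟩
      · rw [show pvStepVal 3 c = 0 from by simp [pvStepVal, pvPAT_eq, List.getD, hK, hT]]
        exact Or.inl ⟨by norm_num,
          by simp [pvSpecFn, pvPAT_eq, List.cons_prefix_cons, Ne.symm hK, Ne.symm hT]⟩
  · by_cases hE : c = 'E'
    · subst hE
      rw [show pvStepVal 4 'E' = 5 from by decide]
      exact Or.inl ⟨by norm_num, by simp [pvPAT_eq]⟩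
    · by_cases hT : c = 'T'
      · subst hT
        rw [show pvStepVal 4 'T' = 1 from by decide]
        exact Or.inl ⟨by norm_num, by simp [pvSpecFn, pvPAT_eq, List.cons_prefix_cons]⟩
      · rw [show pvStepVal 4 c = 0 from by simp [pvStepVal, pvPAT_eq, List.getD, hE, hT]]
        exact Or.inl ⟨by norm_num,
          by simp [pvSpecFn, pvPAT_eq, List.cons_prefix_cons, Ne.symm hE, Ne.symm hT]⟩
  · by_cases hT : c = 'T'
    · subst hT
      rw [show pvStepVal 5 'T' = 6 from by decide]
      exact Or.inl ⟨by norm_num, by simp [pvPAT_eq]⟩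
    · rw [show pvStepVal 5 c = 0 from by simp [pvStepVal, pvPAT_eq, List.getD, hT]]
      exact Or.inl ⟨by norm_num, by simp [pvSpecFn, pvPAT_eq, List.cons_prefix_cons, Ne.symm hT]⟩
  · by_cases hD : c = '-'
    · subst hD
      rw [show pvStepVal 6 '-' = 7 from by decide]
      exact Or.inr ⟨rfl, by simp [pvSpecFn, pvPAT_eq, List.cons_prefix_cons]⟩
    · by_cases hI : c = 'I'
      · subst hI
        rw [show pvStepVal 6 'I' = 2 from by decide]
        exact Or.inl ⟨by norm_num, by simp [pvSpecFn, pvPAT_eq, List.cons_prefix_cons]⟩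
      · by_cases hT : c = 'T'
        · subst hT
          rw [show pvStepVal 6 'T' = 1 from by decide]
          exact Or.inl ⟨by norm_num,
            by simp [pvSpecFn, pvPAT_eq, List.cons_prefix_cons, Ne.symm hD]⟩
        · rw [show pvStepVal 6 c = 0 from by simp [pvStepVal, pvPAT_eq, List.getD, hD, hI, hT]]
          exact Or.inl ⟨by norm_num,
            by simp [pvSpecFn, pvPAT_eq, List.cons_prefix_cons, Ne.symm hD, Ne.symm hI, Ne.symm hT]⟩

theorem pvKmp_spec (cs : List Char) : ∀ k, k ≤ 6 →
    pvFinish (pvKmp cs k) = pvSpecFn (pvPAT.take k ++ cs) := by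
  induction cs with
  | nil =>
    intro k hk
    rw [pvKmp, pvFinish, if_pos (by omega : k < 7)]
    rw [pvSpecFn_short _ (by simp; omega)]
  | cons c cs ih =>
    intro k hk
    rw [pvKmp, if_pos (by omega : k < 7)]
    rcases pvStep_spec k hk c cs with ⟨h6, hspec⟩ | ⟨h7, hspec⟩
    · rw [hspec]; exact ih _ h6
    · rw [h7, pvKmp_done, pvFinish_seven, hspec]

theorem B_eq_spec (line : String) :
    parse_ticket_id_from_line_py_alt line = pvSpecFn line.toList := by
  have h := pvKmp_spec line.toList 0 (by omega)
  simp only [List.take_zero, List.nil_append] at h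
  rw [← h]
  rfl

-- ===== VERDICT (by name: the statement is the Claim_ definition above) =====
theorem parse_ticket_id_from_line_py_spec : Claim_equal_parse_ticket_id_from_line_py := by
  intro line _
  unfold Spec_parse_ticket_id_from_line_py
  rw [A_eq_spec, B_eq_spec]
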